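-- pv_equiv track=rewrite | github.com/AntonS-bio/AmpliSeqDesigner | scripts/identify_species_snps.py | _map_msa_to_ref_coordinates
-- ===== SOURCE A (Python) =====
-- from typing import List, Dict
--
-- def _map_msa_to_ref_coordinates(msa_seq:List[str])-> Dict[int, int]:
--     """MSA produces a sequence string with gaps so position of nucleotide in the string
--     does not correspond to the position of nucleotide in reference sequence.
--     This function creates a mapping that allows SNP object to have coordinates of the reference
--     sequence.
--     Where msa position has missing value, the dictionary value is -1
--     The full amplicon sequence is included in MSA, see generate_msa.generate_msa and  generate_msa._align_results
--     """
--     amplicon_position=0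
--     msa_to_amplicon_position: Dict[int,int]={}
--     for msa_position, position_value in enumerate(msa_seq):
--         if position_value!="-":
--             msa_to_amplicon_position[msa_position]=amplicon_position
--             amplicon_position+=1
--         else:
--             msa_to_amplicon_position[msa_position]=-1
--     return msa_to_amplicon_position
-- ===== SOURCE B (Python) =====
-- from typing import List, Dict
--
-- def _map_msa_to_ref_coordinates(msa_seq:List[str])-> Dict[int, int]:
--     # Initialize every MSA position to -1, then collect the list of non-gap
--     # positions and assign them consecutive reference coordinates: the value
--     # of a non-gap position is simply its rank in that list (no running counter).
--     mapping = dict.fromkeys(range(len(msa_seq)), -1)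
--     non_gap_positions = [i for i, c in enumerate(msa_seq) if c != "-"]
--     for ref_pos, msa_pos in enumerate(non_gap_positions):
--         mapping[msa_pos] = ref_pos
--     return mapping
-- ===== Notes on version B (the rewrite author's own statement) =====
-- stated objective: alternative
-- what changed: Instead of one loop that increments a counter while inserting, B initializes all positions to -1 via dict.fromkeys, extracts the list of non-gap positions, and overwrites each with its rank (enumerate index) in that list.
import Mathlib
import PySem

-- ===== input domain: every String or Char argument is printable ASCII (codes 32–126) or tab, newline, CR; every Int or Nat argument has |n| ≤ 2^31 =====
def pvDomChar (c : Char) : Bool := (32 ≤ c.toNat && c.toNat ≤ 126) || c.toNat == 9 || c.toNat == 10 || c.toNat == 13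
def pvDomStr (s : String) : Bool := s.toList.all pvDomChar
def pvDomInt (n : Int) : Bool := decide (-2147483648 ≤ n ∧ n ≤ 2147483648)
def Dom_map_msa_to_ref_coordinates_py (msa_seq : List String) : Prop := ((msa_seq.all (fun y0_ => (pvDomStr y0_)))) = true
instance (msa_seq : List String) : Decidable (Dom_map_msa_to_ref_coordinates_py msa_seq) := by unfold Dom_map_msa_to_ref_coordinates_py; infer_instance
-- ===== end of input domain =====

-- B replaces A's single counter-incrementing dict loop by: initialize all positions to -1,
-- extract the list of non-gap positions, and overwrite each with its rank in that list;
-- alternative decomposition, same asymptotic cost.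


-- ===== PORT A =====
def map_msa_to_ref_coordinates_py (msa_seq : List String) : List (Int × Int) :=
  (((PySem.List.enumerate msa_seq).foldl
      (fun (st : Int × PySem.Dict Int Int) p =>
        if p.2 != "-" then (st.1 + 1, st.2.insert p.1 st.1)
        else (st.1, st.2.insert p.1 (-1)))
      (0, PySem.Dict.empty)).2).items

-- ===== PORT B =====
def map_msa_to_ref_coordinates_py_alt (msa_seq : List String) : List (Int × Int) :=
  let mapping : PySem.Dict Int Int :=
    (PySem.List.pyRange 0 (msa_seq.length : Int) 1).foldl
      (fun d i => d.insert i (-1)) PySem.Dict.empty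
  let non_gap_positions : List Int :=
    ((PySem.List.enumerate msa_seq).filter (fun p => p.2 != "-")).map (fun p => p.1)
  ((PySem.List.enumerate non_gap_positions).foldl
      (fun d p => d.insert p.2 p.1) mapping).items

-- ===== PRECONDITION & SPEC =====
def Spec_map_msa_to_ref_coordinates_py (msa_seq : List String) (out : List (Int × Int)) : Prop := out = map_msa_to_ref_coordinates_py_alt msa_seq
instance (msa_seq : List String) (out : List (Int × Int)) : Decidable (Spec_map_msa_to_ref_coordinates_py msa_seq out) := by unfold Spec_map_msa_to_ref_coordinates_py; infer_instance

-- ===== CLAIM (what is proved, stated in full; the proofs are below) =====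
def Claim_equal_map_msa_to_ref_coordinates_py : Prop := ∀ (msa_seq : List String), Dom_map_msa_to_ref_coordinates_py msa_seq → Spec_map_msa_to_ref_coordinates_py msa_seq (map_msa_to_ref_coordinates_py msa_seq)

-- ===== LEMMAS AND PROOFS =====

/-- Canonical form of A's mapping: `s` is the current MSA index, `a` the running count. -/
def pvCanon : List Bool → Int → Int → List (Int × Int)
  | [], _, _ => []
  | f :: t, s, a =>
    if f then (s, a) :: pvCanon t (s + 1) (a + 1) else (s, -1) :: pvCanon t (s + 1) a

theorem pvCanon_length (fl : List Bool) (s a : Int) : (pvCanon fl s a).length = fl.length := by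
  induction fl generalizing s a with
  | nil => rfl
  | cons f t ih => by_cases hf : f <;> simp [pvCanon, hf, ih]

theorem pvCanon_getElem (fl : List Bool) (s a : Int) (k : Nat) (hk : k < fl.length) :
    (pvCanon fl s a)[k]'(by rw [pvCanon_length]; exact hk)
      = (s + k, if fl[k] then a + ((fl.take k).countP (fun x => x) : Int) else -1) := by
  induction fl generalizing s a k with
  | nil => simp at hk
  | cons f t ih =>
    cases k with
    | zero => by_cases hf : f <;> simp [pvCanon, hf]
    | succ k =>
      have hk' : k < t.length := by simpa using hk
      by_cases hf : f
      · simp [pvCanon, hf, ih _ _ k hk', Prod.ext_iff]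
        constructor
        · ring
        · split <;> push_cast <;> ring
      · simp [pvCanon, hf, ih _ _ k hk', Prod.ext_iff]
        ring

/-- A's loop, generalized: fresh-key inserts append to the items list. -/
theorem pvA_loop (l : List String) (s a : Int) (d : PySem.Dict Int Int)
    (hlt : ∀ k ∈ d.keys, k < s) :
    (((PySem.List.enumerate l s).foldl
        (fun (st : Int × PySem.Dict Int Int) p =>
          if p.2 != "-" then (st.1 + 1, st.2.insert p.1 st.1)
          else (st.1, st.2.insert p.1 (-1)))
        (a, d)).2).items
      = d.items ++ pvCanon (l.map (fun c => c != "-")) s a := by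
  induction l generalizing s a d with
  | nil => simp [PySem.List.enumerate_nil, pvCanon]
  | cons c t ih =>
    have hfresh : d.contains s = false := by
      by_contra h
      have : s ∈ d.keys := (PySem.Dict.contains_iff_mem_keys d s).mp (by
        cases hcd : d.contains s
        · exact absurd hcd h
        · rfl)
      exact absurd (hlt s this) (lt_irrefl s)
    have hlt' : ∀ v : Int, ∀ k ∈ (d.insert s v).keys, k < s + 1 := by
      intro v k hk
      rcases (PySem.Dict.mem_keys_insert d s k v).mp hk with h | h
      · omega
      · have := hlt k h; omega
    rw [PySem.List.enumerate_cons]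
    by_cases hc : c ≠ "-"
    · have hb : (c != "-") = true := by simpa using hc
      simp only [List.foldl_cons, hb, if_true]
      rw [ih (s + 1) (a + 1) _ (hlt' a),
        PySem.Dict.items_insert_of_not_contains d a hfresh]
      simp [pvCanon, hb]
    · have hb : (c != "-") = false := by simpa using hc
      simp only [List.foldl_cons, hb]
      rw [if_neg (by simp), ih (s + 1) a _ (hlt' (-1)),
        PySem.Dict.items_insert_of_not_contains d (-1) hfresh]
      simp [pvCanon, hb]

/-- Pure-list form of B's non-gap-position comprehension, with starting index `s`. -/
def pvNG : List Bool → Int → List Int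
  | [], _ => []
  | f :: t, s => if f then s :: pvNG t (s + 1) else pvNG t (s + 1)

theorem pvNG_eq (l : List String) (s : Int) :
    ((PySem.List.enumerate l s).filter (fun p => p.2 != "-")).map (fun p => p.1)
      = pvNG (l.map (fun c => c != "-")) s := by
  induction l generalizing s with
  | nil => simp [PySem.List.enumerate_nil, pvNG]
  | cons c t ih =>
    rw [PySem.List.enumerate_cons]
    by_cases hc : (c != "-") = true <;> simp [pvNG, hc, ih]

theorem pvNG_lb (fl : List Bool) (s : Int) : ∀ x ∈ pvNG fl s, s ≤ x := by
  induction fl generalizing s with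
  | nil => simp [pvNG]
  | cons f t ih =>
    intro x hx
    by_cases hf : f
    · simp only [pvNG, hf, if_true, List.mem_cons] at hx
      rcases hx with rfl | hx
      · omega
      · have := ih (s + 1) x hx; omega
    · simp only [pvNG, hf] at hx
      have := ih (s + 1) x hx; omega

theorem pvNG_nodup (fl : List Bool) (s : Int) : (pvNG fl s).Nodup := by
  induction fl generalizing s with
  | nil => simp [pvNG]
  | cons f t ih =>
    by_cases hf : f
    · simp only [pvNG, hf, if_true]
      refine List.nodup_cons.mpr ⟨?_, ih (s + 1)⟩
      intro hmem
      have := pvNG_lb t (s + 1) s hmem; omega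
    · simpa [pvNG, hf] using ih (s + 1)

theorem pvNG_mem (fl : List Bool) (s x : Int) (hx : x ∈ pvNG fl s) :
    ∃ m : Nat, ∃ _ : m < fl.length, fl[m] = true ∧ x = s + m := by
  induction fl generalizing s with
  | nil => simp [pvNG] at hx
  | cons f t ih =>
    by_cases hf : f
    · simp only [pvNG, hf, if_true, List.mem_cons] at hx
      rcases hx with rfl | hx
      · exact ⟨0, by simp, by simp [hf], by simp⟩
      · obtain ⟨m, hm, hfl, hxe⟩ := ih (s + 1) hx
        exact ⟨m + 1, by simpa using hm, by simpa using hfl, by push_cast [hxe]; ring⟩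
    · simp only [pvNG, hf] at hx
      obtain ⟨m, hm, hfl, hxe⟩ := ih (s + 1) hx
      exact ⟨m + 1, by simpa using hm, by simpa using hfl, by push_cast [hxe]; ring⟩

theorem pvNG_mem_enum (fl : List Bool) (s a : Int) (k : Nat) (hk : k < fl.length)
    (hf : fl[k] = true) :
    (a + ((fl.take k).countP (fun x => x) : Int), s + k)
      ∈ PySem.List.enumerate (pvNG fl s) a := by
  induction fl generalizing s a k with
  | nil => simp at hk
  | cons f t ih =>
    cases k with
    | zero =>
      have hfv : f = true := by simpa using hf
      simp [pvNG, hfv, PySem.List.enumerate_cons]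
    | succ k =>
      have hk' : k < t.length := by simpa using hk
      have hf' : t[k] = true := by simpa using hf
      cases f with
      | true =>
        have hmem := ih (s + 1) (a + 1) k hk' hf'
        have hcast : a + ((((true : Bool) :: t).take (k + 1)).countP (fun x => x) : Int)
            = a + 1 + ((t.take k).countP (fun x => x) : Int) := by
          simp; ring
        have hcoord : s + ((k + 1 : Nat) : Int) = s + 1 + (k : Nat) := by push_cast; ring
        simp only [pvNG, if_true]
        rw [PySem.List.enumerate_cons]
        exact List.mem_cons.mpr (Or.inr (by rw [hcast, hcoord]; exact hmem))
      | false =>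
        have hmem := ih (s + 1) a k hk' hf'
        have hcast : a + ((((false : Bool) :: t).take (k + 1)).countP (fun x => x) : Int)
            = a + ((t.take k).countP (fun x => x) : Int) := by simp
        have hcoord : s + ((k + 1 : Nat) : Int) = s + 1 + (k : Nat) := by push_cast; ring
        have hng : pvNG (false :: t) s = pvNG t (s + 1) := by simp [pvNG]
        rw [hng, hcast, hcoord]
        exact hmem

/-- B's second loop leaves untouched keys alone. -/
theorem pvFold_getD_not_mem (l : List (Int × Int)) (d : PySem.Dict Int Int) (k dflt : Int)
    (h : k ∉ l.map Prod.snd) :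
    (l.foldl (fun d p => d.insert p.2 p.1) d).getD k dflt = d.getD k dflt := by
  induction l generalizing d with
  | nil => rfl
  | cons p t ih =>
    simp only [List.map_cons, List.mem_cons, not_or] at h
    rw [List.foldl_cons, ih _ h.2, PySem.Dict.getD_insert_of_ne d p.1 dflt h.1]

/-- B's second loop: with distinct keys, an inserted pair determines the final value. -/
theorem pvFold_getD_mem (l : List (Int × Int)) (d : PySem.Dict Int Int) (j k dflt : Int)
    (h : (j, k) ∈ l) (hnd : (l.map Prod.snd).Nodup) :
    (l.foldl (fun d p => d.insert p.2 p.1) d).getD k dflt = j := by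
  induction l generalizing d with
  | nil => simp at h
  | cons p t ih =>
    simp only [List.map_cons, List.nodup_cons] at hnd
    rcases List.mem_cons.mp h with rfl | hmem
    · rw [List.foldl_cons, pvFold_getD_not_mem t _ k dflt (by simpa using hnd.1),
        PySem.Dict.getD_insert_self]
    · rw [List.foldl_cons]; exact ih _ hmem hnd.2

-- ===== VERDICT (by name: the statement is the Claim_ definition above) =====
theorem map_msa_to_ref_coordinates_py_spec : Claim_equal_map_msa_to_ref_coordinates_py := by
  intro msa_seq _
  unfold Spec_map_msa_to_ref_coordinates_py
  unfold map_msa_to_ref_coordinates_py map_msa_to_ref_coordinates_py_alt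
  set n : Nat := msa_seq.length with hn
  set flags : List Bool := msa_seq.map (fun c => c != "-") with hflags
  -- A's side is the canonical list
  rw [pvA_loop msa_seq 0 0 PySem.Dict.empty (by simp [PySem.Dict.keys_empty])]
  have hie : (PySem.Dict.empty : PySem.Dict Int Int).items = [] := rfl
  simp only [hie, List.nil_append]
  -- B's phase 1: fresh distinct keys append
  have hd0items :
      ((PySem.List.pyRange 0 (n : Int) 1).foldl
          (fun d i => d.insert i (-1)) (PySem.Dict.empty : PySem.Dict Int Int)).items
        = (PySem.List.pyRange 0 (n : Int) 1).map (fun i => (i, (-1 : Int))) := by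
    rw [PySem.Dict.items_foldl_insert_fresh (PySem.List.pyRange 0 (n : Int) 1)
        (fun i => i) (fun _ => (-1 : Int)) PySem.Dict.empty
        (by intro a _; simp [PySem.Dict.contains_empty])
        (by simpa using PySem.List.nodup_pyRange_one 0 (n : Int))]
    simp [hie]
  set d0 : PySem.Dict Int Int :=
    (PySem.List.pyRange 0 (n : Int) 1).foldl (fun d i => d.insert i (-1)) PySem.Dict.empty
    with hd0
  have hd0keys : d0.keys = PySem.List.pyRange 0 (n : Int) 1 := by
    show d0.items.map Prod.fst = _
    rw [hd0items]; simp [Function.comp_def]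
  have hd0nodup : d0.keys.Nodup := by
    rw [hd0keys]; exact PySem.List.nodup_pyRange_one 0 (n : Int)
  have hd0getD : ∀ (k : Nat) (dflt : Int), k < n → d0.getD (k : Int) dflt = -1 := by
    intro k dflt hk
    refine PySem.Dict.getD_of_mem_items d0 ?_ hd0nodup dflt
    rw [hd0items]
    exact List.mem_map.mpr ⟨(k : Int), by
      rw [PySem.List.mem_pyRange_one]; omega, rfl⟩
  -- B's non-gap list
  rw [pvNG_eq msa_seq 0, ← hflags]
  set ng : List Int := pvNG flags 0 with hng
  have hngmem : ∀ x ∈ ng, x ∈ d0.keys := by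
    intro x hx
    obtain ⟨m, hm, _, hxe⟩ := pvNG_mem flags 0 x hx
    rw [hd0keys, PySem.List.mem_pyRange_one]
    have : m < n := by simpa [hflags] using hm
    omega
  set l2 : List (Int × Int) := PySem.List.enumerate ng 0 with hl2
  have hsnds : l2.map Prod.snd = ng := PySem.List.map_snd_enumerate ng 0
  have hsndnodup : (l2.map Prod.snd).Nodup := by rw [hsnds]; exact pvNG_nodup flags 0
  set dF : PySem.Dict Int Int := l2.foldl (fun d p => d.insert p.2 p.1) d0 with hdF
  -- keys are preserved by phase 2
  have hkeysF : dF.keys = d0.keys := by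
    rw [hdF]
    have := PySem.Dict.keys_foldl_insert_key l2 Prod.snd (fun d p => p.1) d0
    rw [this, PySem.Set.update_eq_append_filter]
    have : ((PySem.Set.ofList (l2.map Prod.snd)).filter
        (fun y => !(PySem.Set.contains d0.keys y))) = [] := by
      apply List.filter_eq_nil_iff.mpr
      intro y hy
      have hy' : y ∈ ng := by
        rw [← hsnds]; exact (PySem.Set.mem_ofList _ _).mp hy
      simpa using hngmem y hy'
    rw [this, List.append_nil]
  have hkeysFnodup : dF.keys.Nodup := by rw [hkeysF]; exact hd0nodup
  -- final items pointwise
  rw [PySem.Dict.items_eq_map_keys dF hkeysFnodup 0, hkeysF, hd0keys]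
  apply List.ext_getElem
  · simp [pvCanon_length, hflags, PySem.List.length_pyRange_one, hn]
  · intro k h1 h2
    have hkn : k < n := by
      simpa [PySem.List.length_pyRange_one] using h2
    have hkf : k < flags.length := by simpa [hflags] using hkn
    rw [pvCanon_getElem flags 0 0 k hkf]
    simp only [List.getElem_map, PySem.List.getElem_pyRange_one]
    have hkey : (0 : Int) + (k : Nat) = (k : Int) := by ring
    rw [hkey]
    by_cases hf : flags[k] = true
    · have hmem : (((flags.take k).countP (fun x => x) : Int), (k : Int)) ∈ l2 := by
        have := pvNG_mem_enum flags 0 0 k hkf hf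
        simpa using this
      rw [hdF, pvFold_getD_mem l2 d0 _ _ 0 hmem hsndnodup]
      simp [hf]
    · have hnotmem : (k : Int) ∉ l2.map Prod.snd := by
        rw [hsnds]
        intro hmem
        obtain ⟨m, hm, hflm, hxe⟩ := pvNG_mem flags 0 _ hmem
        have : m = k := by omega
        subst this
        exact hf hflm
      rw [hdF, pvFold_getD_not_mem l2 d0 _ 0 hnotmem, hd0getD k 0 hkn]
      simp [hf]
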